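-- pv_equiv track=rewrite | github.com/bekirdag/gpt-creator | scripts/python/story_scheduler.py | _compute_ancestors
-- ===== SOURCE A (Python) =====
-- from typing import Dict, Iterable, List, Optional, Sequence, Set, Tuple
--
-- def _compute_ancestors(parents_map: Dict[str, Set[str]]) -> Dict[str, Set[str]]:
--     memo: Dict[str, Set[str]] = {}
--
--     def visit(node: str) -> Set[str]:
--         if node in memo:
--             return memo[node]
--         ancestors: Set[str] = set()
--         for parent in parents_map.get(node, ()):
--             ancestors.add(parent)
--             ancestors.update(visit(parent))
--         memo[node] = ancestors
--         return ancestors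
--
--     for node in parents_map:
--         visit(node)
--     return memo
-- ===== SOURCE B (Python) =====
-- def _compute_ancestors(parents_map):
--     result = {}
--     for root in parents_map:
--         stack = [(root, False)]
--         while stack:
--             node, done = stack.pop()
--             if done:
--                 anc = set()
--                 for p in parents_map.get(node, ()):
--                     anc.add(p)
--                     anc |= result[p]
--                 result[node] = anc
--             elif node not in result:
--                 stack.append((node, True))
--                 for p in reversed(list(parents_map.get(node, ()))):
--                     stack.append((p, False))
--     return result
-- ===== Notes on version B (the rewrite author's own statement) =====
-- stated objective: alternative
-- what changed: Replaces A's memoized recursive visit() with a single iterative explicit-stack post-order traversal that, when a node is finished, unions the already-stored parent sets from the result dict.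
import Mathlib
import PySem

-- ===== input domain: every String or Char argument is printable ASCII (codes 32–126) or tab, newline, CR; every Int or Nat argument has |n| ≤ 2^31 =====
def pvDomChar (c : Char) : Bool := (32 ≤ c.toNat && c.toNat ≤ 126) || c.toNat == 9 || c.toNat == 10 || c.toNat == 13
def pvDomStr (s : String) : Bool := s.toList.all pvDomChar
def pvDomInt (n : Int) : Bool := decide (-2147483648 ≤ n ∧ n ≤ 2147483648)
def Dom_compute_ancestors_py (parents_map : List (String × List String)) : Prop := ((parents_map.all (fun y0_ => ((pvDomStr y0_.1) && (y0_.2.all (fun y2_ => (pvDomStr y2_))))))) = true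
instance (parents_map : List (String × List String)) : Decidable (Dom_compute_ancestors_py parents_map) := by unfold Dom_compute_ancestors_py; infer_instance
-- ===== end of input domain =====

-- B replaces A's memoized recursion by one iterative explicit-stack post-order pass that unions the
-- already-stored parent sets (objective: alternative decomposition, same values on acyclic inputs).

-- a Python for-loop whose body may raise, as a fold over Option state (shared by both ports)
def pvOptFold {α β : Type} (f : β → α → Option β) (init : Option β) (ps : List α) : Option β :=
  ps.foldl (fun acc p => acc.bind (fun b => f b p)) init

-- total size of the input (keys + parent entries); used only to size the ports' fuel
def pvSumLen (pm : List (String × List String)) : Nat := pm.foldl (fun a kv => a + kv.2.length) 0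

-- ===== PORT A =====
-- visit(node): memo hit, else loop over parents (ancestors.add(parent); ancestors.update(visit(parent))),
-- then memo[node] = ancestors.  The fuel only bounds the recursion depth (Python's recursion is unbounded;
-- under Pre_ the proof shows this fuel always suffices, so no admitted input reaches the 0 case).
def visitA (pm : List (String × List String)) :
    Nat → PySem.Dict String (List String) → String →
    Option (PySem.Dict String (List String) × List String)
  | 0, _, _ => none
  | f+1, memo, node =>
    match memo.get? node with
    | some s => some (memo, s)
    | none =>
      match pvOptFold (fun (ms : PySem.Dict String (List String) × List String) p =>
              (visitA pm f ms.1 p).map (fun ms' => (ms'.1, PySem.Set.update (PySem.Set.add ms.2 p) ms'.2)))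
            (some (memo, ([] : List String))) ((PySem.Dict.mk pm).getD node []) with
      | none => none
      | some ma => some (ma.1.insert node ma.2, ma.2)

def compute_ancestors_py (parents_map : List (String × List String)) : List (String × List String) :=
  match pvOptFold (fun memo kv => (visitA parents_map (parents_map.length + pvSumLen parents_map + 1) memo kv.1).map Prod.fst)
      (some PySem.Dict.empty) parents_map with
  | some memo => memo.items
  | none => []

-- ===== PORT B =====
-- anc = set(); for p in parents_map.get(node, ()): anc.add(p); anc |= result[p]   (result[p] may raise: Option)
def ancB (pm : List (String × List String)) (result : PySem.Dict String (List String)) (node : String) :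
    Option (List String) :=
  pvOptFold (fun a p => (result.get? p).map (fun s => PySem.Set.update (PySem.Set.add a p) s))
    (some ([] : List String)) ((PySem.Dict.mk pm).getD node [])

-- the while-loop over the explicit stack; fuel only makes the loop total (a cyclic input loops forever in Python)
def runB (pm : List (String × List String)) :
    Nat → List (String × Bool) → PySem.Dict String (List String) →
    Option (PySem.Dict String (List String))
  | _, [], result => some result
  | 0, _ :: _, _ => none
  | f+1, (node, done) :: rest, result =>
    if done then
      match ancB pm result node with
      | none => none
      | some a => runB pm f rest (result.insert node a)
    else if result.contains node then
      runB pm f rest result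
    else
      runB pm f (((PySem.Dict.mk pm).getD node []).reverse.foldl (fun st p => (p, false) :: st)
        ((node, true) :: rest)) result

-- fuel bound for runB (counts stack pops; sized in the proofs, never reached under Pre_)
def costF (S : Nat) : Nat → Nat
  | 0 => 0
  | f+1 => 2 + S * costF S f

def compute_ancestors_py_alt (parents_map : List (String × List String)) : List (String × List String) :=
  match pvOptFold (fun res kv =>
      runB parents_map (costF (pvSumLen parents_map) (parents_map.length + pvSumLen parents_map + 1)) [(kv.1, false)] res)
      (some PySem.Dict.empty) parents_map with
  | some r => r.items
  | none => []

-- ===== PRECONDITION & SPEC =====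
-- truncated height of a node: pvHgt pm k n = length of the longest parent-chain from n, cut off at depth k
def pvHgt (pm : List (String × List String)) : Nat → String → Nat
  | 0, _ => 0
  | k+1, n => ((PySem.Dict.mk pm).getD n []).foldl (fun m p => max m (1 + pvHgt pm k p)) 0

def pvNodes (pm : List (String × List String)) : List String :=
  pm.map Prod.fst ++ pm.flatMap Prod.snd

-- Pre_ excludes exactly the cyclic parent maps: there Python A recurses without bound (RecursionError),
-- so A returns no value.  On acyclic maps every chain is shorter than the input size, heights have
-- stabilised at that depth and Pre_ holds.
def Pre_compute_ancestors_py (parents_map : List (String × List String)) : Prop :=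
  ∀ n ∈ pvNodes parents_map,
    pvHgt parents_map (parents_map.length + pvSumLen parents_map + 1) n
      = pvHgt parents_map (parents_map.length + pvSumLen parents_map) n
instance (parents_map : List (String × List String)) : Decidable (Pre_compute_ancestors_py parents_map) := by
  unfold Pre_compute_ancestors_py; infer_instance

def pvWitness_compute_ancestors_py : (List (String × List String)) :=
  [("b", ["a", "c"]), ("a", []), ("d", ["b"])]

def Spec_compute_ancestors_py (parents_map : List (String × List String)) (out : List (String × List String)) : Prop := out = compute_ancestors_py_alt parents_map
instance (parents_map : List (String × List String)) (out : List (String × List String)) : Decidable (Spec_compute_ancestors_py parents_map out) := by unfold Spec_compute_ancestors_py; infer_instance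

-- ===== CLAIM (what is proved, stated in full; the proofs are below) =====
def Claim_equal_compute_ancestors_py : Prop := ∀ (parents_map : List (String × List String)), Dom_compute_ancestors_py parents_map → Pre_compute_ancestors_py parents_map → Spec_compute_ancestors_py parents_map (compute_ancestors_py parents_map)

-- ===== LEMMAS AND PROOFS =====

theorem pvOptFold_none {α β : Type} (f : β → α → Option β) (ps : List α) :
    pvOptFold f none ps = none := by
  induction ps with
  | nil => rfl
  | cons p ps ih => simpa [pvOptFold] using ih

theorem pvOptFold_cons {α β : Type} (f : β → α → Option β) (b : β) (p : α) (ps : List α) :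
    pvOptFold f (some b) (p :: ps) = pvOptFold f (f b p) ps := rfl

theorem pvOptFold_some_cons {α β : Type} {f : β → α → Option β} {b out : β} {p : α} {ps : List α}
    (h : pvOptFold f (some b) (p :: ps) = some out) :
    ∃ b1, f b p = some b1 ∧ pvOptFold f (some b1) ps = some out := by
  rw [pvOptFold_cons] at h
  cases hb : f b p with
  | none => rw [hb, pvOptFold_none] at h; cases h
  | some b1 => exact ⟨b1, rfl, by rwa [hb] at h⟩

-- get? is the first matching item
theorem pv_get?_mem {pm : List (String × List String)} {n : String} {v : List String}
    (h : (PySem.Dict.mk pm).get? n = some v) : (n, v) ∈ pm := by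
  simp only [PySem.Dict.get?] at h
  cases hf : List.find? (fun p => p.1 == n) pm with
  | none => rw [hf] at h; cases h
  | some kv =>
    rw [hf] at h
    have hm := List.mem_of_find?_eq_some hf
    have hp := List.find?_some hf
    simp only [Option.map_some, Option.some.injEq] at h
    simp only [beq_iff_eq] at hp
    obtain ⟨k2, v2⟩ := kv
    simp only at hp h
    subst hp; subst h
    exact hm

theorem pv_sumLen_eq (pm : List (String × List String)) :
    pvSumLen pm = (pm.map (fun kv => kv.2.length)).sum := by
  unfold pvSumLen
  induction pm with
  | nil => rfl
  | cons a l ih =>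
    rw [List.foldl_cons, List.map_cons, List.sum_cons]
    have hstep : ∀ (init : Nat) (l' : List (String × List String)),
        l'.foldl (fun a kv => a + kv.2.length) init = init + l'.foldl (fun a kv => a + kv.2.length) 0 := by
      intro init l'
      induction l' generalizing init with
      | nil => simp
      | cons b t ih2 =>
        rw [List.foldl_cons, List.foldl_cons, ih2 (init + b.2.length), ih2 (0 + b.2.length)]
        omega
    rw [hstep, ih]
    omega

theorem pv_sumLen_of_mem {pm : List (String × List String)} {kv : String × List String}
    (h : kv ∈ pm) : kv.2.length ≤ pvSumLen pm := by
  rw [pv_sumLen_eq]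
  exact List.le_sum_of_mem (List.mem_map_of_mem h (f := fun kv => kv.2.length))

theorem pv_parents_len_le (pm : List (String × List String)) (n : String) :
    ((PySem.Dict.mk pm).getD n []).length ≤ pvSumLen pm := by
  cases hg : (PySem.Dict.mk pm).get? n with
  | none => simp [PySem.Dict.getD, hg]
  | some v =>
    have := pv_sumLen_of_mem (pv_get?_mem hg)
    simpa [PySem.Dict.getD, hg] using this

theorem pv_getD_of_not_key {pm : List (String × List String)} {n : String}
    (h : n ∉ pm.map Prod.fst) : (PySem.Dict.mk pm).getD n [] = [] := by
  cases hg : (PySem.Dict.mk pm).get? n with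
  | none => simp [PySem.Dict.getD, hg]
  | some v => exact absurd (List.mem_map_of_mem (pv_get?_mem hg) (f := Prod.fst)) h

-- bound on the fold computing a truncated height
theorem pv_foldl_max_le {α : Type} {ps : List α} {f : α → Nat} {a c : Nat}
    (ha : a ≤ c) (h : ∀ p ∈ ps, f p ≤ c) :
    ps.foldl (fun m p => max m (f p)) a ≤ c := by
  induction ps generalizing a with
  | nil => simpa
  | cons p ps ih =>
    exact ih (by simp [ha, h p (by simp)]) (fun q hq => h q (by simp [hq]))

theorem pv_hgt_le (pm : List (String × List String)) (k : Nat) (n : String) :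
    pvHgt pm k n ≤ k := by
  induction k generalizing n with
  | zero => simp [pvHgt]
  | succ k ih =>
    exact pv_foldl_max_le (by omega) (fun p _ => by have := ih p; omega)

-- heights have stabilised everywhere (not only on pvNodes) under Pre_
theorem pv_stab {pm : List (String × List String)} (hp : Pre_compute_ancestors_py pm) :
    ∀ x, pvHgt pm (pm.length + pvSumLen pm + 1) x = pvHgt pm (pm.length + pvSumLen pm) x := by
  intro x
  by_cases hx : x ∈ pvNodes pm
  · exact hp x hx
  · have hk : x ∉ pm.map Prod.fst := fun h => hx (by simp [pvNodes, h])
    have hg := pv_getD_of_not_key hk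
    cases hN : pm.length + pvSumLen pm with
    | zero => simp [pvHgt, hg]
    | succ m => simp [pvHgt, hg]

theorem pv_rank_parent {pm : List (String × List String)} (hp : Pre_compute_ancestors_py pm)
    {n p : String} (hmem : p ∈ (PySem.Dict.mk pm).getD n []) :
    pvHgt pm (pm.length + pvSumLen pm) p < pvHgt pm (pm.length + pvSumLen pm) n := by
  have h1 : pvHgt pm (pm.length + pvSumLen pm + 1) n
      = ((PySem.Dict.mk pm).getD n []).foldl (fun m q => max m (1 + pvHgt pm (pm.length + pvSumLen pm) q)) 0 := rfl
  have h2 := (PySem.List.le_foldl_max_nat ((PySem.Dict.mk pm).getD n [])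
      (fun q => 1 + pvHgt pm (pm.length + pvSumLen pm) q) 0).2 p hmem
  have h3 := pv_stab hp n
  omega

-- fuel sufficiency for A's port on acyclic inputs
theorem pv_suf {pm : List (String × List String)} (hp : Pre_compute_ancestors_py pm) :
    ∀ (f : Nat) (n : String) (memo : PySem.Dict String (List String)),
      pvHgt pm (pm.length + pvSumLen pm) n < f → ∃ r, visitA pm f memo n = some r := by
  intro f
  induction f with
  | zero => intro n memo h; omega
  | succ f ih =>
    intro n memo h
    cases hg : memo.get? n with
    | some s => exact ⟨(memo, s), by simp [visitA, hg]⟩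
    | none =>
      have hloop : ∀ (ps : List String), (∀ p ∈ ps, pvHgt pm (pm.length + pvSumLen pm) p < f) →
          ∀ (st : PySem.Dict String (List String) × List String),
          ∃ out, pvOptFold (fun ms p =>
              (visitA pm f ms.1 p).map (fun ms' => (ms'.1, PySem.Set.update (PySem.Set.add ms.2 p) ms'.2)))
            (some st) ps = some out := by
        intro ps hps
        induction ps with
        | nil => exact fun st => ⟨st, rfl⟩
        | cons p ps ihp =>
          intro st
          obtain ⟨⟨m1, s1⟩, h1⟩ := ih p st.1 (hps p (by simp))
          obtain ⟨out, hout⟩ := ihp (fun q hq => hps q (by simp [hq])) (m1, PySem.Set.update (PySem.Set.add st.2 p) s1)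
          exact ⟨out, by rw [pvOptFold_cons, h1]; simpa using hout⟩
      obtain ⟨out, hout⟩ := hloop ((PySem.Dict.mk pm).getD n [])
        (fun p hpm => by have := pv_rank_parent hp hpm; omega) (memo, [])
      exact ⟨(out.1.insert n out.2, out.2), by simp [visitA, hg, hout]⟩

-- A's visit extends the memo monotonically and records its result
def pvPres (m m' : PySem.Dict String (List String)) : Prop :=
  ∀ x v, m.get? x = some v → m'.get? x = some v

theorem pv_loopp {pm : List (String × List String)} {f : Nat}
    (hvp : ∀ (m : PySem.Dict String (List String)) (p : String) m' s',
      visitA pm f m p = some (m', s') → pvPres m m') :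
    ∀ (ps : List String) (m0 : PySem.Dict String (List String)) (a0 : List String)
      (mL : PySem.Dict String (List String)) (aL : List String),
      pvOptFold (fun ms p =>
          (visitA pm f ms.1 p).map (fun ms' => (ms'.1, PySem.Set.update (PySem.Set.add ms.2 p) ms'.2)))
        (some (m0, a0)) ps = some (mL, aL) → pvPres m0 mL := by
  intro ps
  induction ps with
  | nil => intro m0 a0 mL aL h; cases h; exact fun x v hv => hv
  | cons p ps ih =>
    intro m0 a0 mL aL h
    obtain ⟨b1, hb1, hrest⟩ := pvOptFold_some_cons h
    cases hv : visitA pm f m0 p with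
    | none => rw [hv] at hb1; cases hb1
    | some ms' =>
      rw [hv] at hb1
      cases ms' with
      | mk m1 s1 =>
        simp at hb1
        subst hb1
        exact fun x v hxv => ih m1 _ mL aL hrest x v (hvp m0 p m1 s1 hv x v hxv)

theorem pv_vp {pm : List (String × List String)} :
    ∀ (f : Nat) (memo : PySem.Dict String (List String)) (n : String) m' s,
      visitA pm f memo n = some (m', s) → pvPres memo m' ∧ m'.get? n = some s := by
  intro f
  induction f with
  | zero => intro memo n m' s h; cases h
  | succ f ih =>
    intro memo n m' s h
    rw [visitA] at h
    cases hg : memo.get? n with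
    | some s0 =>
      rw [hg] at h; simp at h
      obtain ⟨h1, h2⟩ := h
      subst h1; subst h2
      exact ⟨fun x v hv => hv, hg⟩
    | none =>
      rw [hg] at h
      cases hf : pvOptFold (fun ms p =>
          (visitA pm f ms.1 p).map (fun ms' => (ms'.1, PySem.Set.update (PySem.Set.add ms.2 p) ms'.2)))
          (some (memo, ([] : List String))) ((PySem.Dict.mk pm).getD n []) with
      | none => rw [hf] at h; cases h
      | some ma =>
        rw [hf] at h; simp at h
        obtain ⟨h1, h2⟩ := h
        have hpres : pvPres memo ma.1 :=
          pv_loopp (fun m p m'' s'' hv => (ih m p m'' s'' hv).1) _ memo [] ma.1 ma.2 hf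
        constructor
        · intro x v hxv
          have hxn : x ≠ n := by
            intro hx; subst hx; rw [hg] at hxv; cases hxv
          rw [← h1, PySem.Dict.get?_insert_of_ne _ _ hxn]
          exact hpres x v hxv
        · rw [← h1, ← h2, PySem.Dict.get?_insert_self]

-- B's per-node set computation agrees with A's loop, reading any memo that extends the loop's result
theorem pv_loopanc {pm : List (String × List String)} {f : Nat} :
    ∀ (ps : List String) (m0 : PySem.Dict String (List String)) (a0 : List String)
      (mL : PySem.Dict String (List String)) (aL : List String),
      pvOptFold (fun ms p =>
          (visitA pm f ms.1 p).map (fun ms' => (ms'.1, PySem.Set.update (PySem.Set.add ms.2 p) ms'.2)))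
        (some (m0, a0)) ps = some (mL, aL) →
      ∀ (M : PySem.Dict String (List String)), pvPres mL M →
      pvOptFold (fun a p => (M.get? p).map (fun s => PySem.Set.update (PySem.Set.add a p) s))
        (some a0) ps = some aL := by
  intro ps
  induction ps with
  | nil => intro m0 a0 mL aL h M hM; cases h; rfl
  | cons p ps ih =>
    intro m0 a0 mL aL h M hM
    obtain ⟨b1, hb1, hrest⟩ := pvOptFold_some_cons h
    cases hv : visitA pm f m0 p with
    | none => rw [hv] at hb1; cases hb1
    | some ms' =>
      rw [hv] at hb1
      cases ms' with
      | mk m1 s1 =>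
        simp at hb1
        subst hb1
        have hrec : m1.get? p = some s1 := (pv_vp f m0 p m1 s1 hv).2
        have hpres1 : pvPres m1 mL := pv_loopp (fun m q m'' s'' hvq => (pv_vp f m q m'' s'' hvq).1) ps m1 _ mL aL hrest
        have hMp : M.get? p = some s1 := hM p s1 (hpres1 p s1 hrec)
        rw [pvOptFold_cons, hMp]
        exact ih m1 _ mL aL hrest M hM

-- runB equations and monotonicity in fuel
theorem runB_nil (pm : List (String × List String)) (f : Nat) (r : PySem.Dict String (List String)) :
    runB pm f [] r = some r := by cases f <;> rfl

theorem runB_mono (pm : List (String × List String)) :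
    ∀ (f : Nat) (s : List (String × Bool)) (r : PySem.Dict String (List String)) out (d : Nat),
      runB pm f s r = some out → runB pm (f + d) s r = some out := by
  intro f
  induction f with
  | zero =>
    intro s r out d h
    cases s with
    | nil => rw [runB_nil] at h ⊢; exact h
    | cons a t => cases h
  | succ f ih =>
    intro s r out d h
    cases s with
    | nil => rw [runB_nil] at h ⊢; exact h
    | cons a t =>
      cases a with
      | mk node done =>
        have heq : f + 1 + d = (f + d) + 1 := by omega
        rw [heq]
        rw [runB] at h ⊢
        by_cases hd : done
        · simp only [hd, if_true] at h ⊢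
          cases ha : ancB pm r node with
          | none => rw [ha] at h; cases h
          | some a' => rw [ha] at h; exact ih _ _ _ d h
        · simp only [hd] at h ⊢
          by_cases hc : r.contains node
          · simp only [hc, if_true] at h ⊢; exact ih _ _ _ d h
          · simp only [hc] at h ⊢; exact ih _ _ _ d h

-- pushing the reversed parent list = prepending the parents in order
theorem pv_revpush (l : List String) (st0 : List (String × Bool)) :
    l.reverse.foldl (fun st p => (p, false) :: st) st0 = l.map (fun p => (p, false)) ++ st0 := by
  induction l generalizing st0 with
  | nil => rfl
  | cons p t ih =>
    simp [List.foldl_append, ih]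

-- contains vs get?
theorem pv_contains_of_get? {d : PySem.Dict String (List String)} {n : String} {s : List String}
    (h : d.get? n = some s) : d.contains n = true := by
  by_cases hc : d.contains n
  · exact hc
  · rw [(PySem.Dict.get?_eq_none_iff_contains d n).2 (by simpa using hc)] at h; cases h

theorem pv_not_contains_of_get? {d : PySem.Dict String (List String)} {n : String}
    (h : d.get? n = none) : d.contains n = false := by
  by_cases hc : d.contains n
  · exact absurd ((PySem.Dict.get?_eq_none_iff_contains d n).1 h) (by simp [hc])
  · simpa using hc

-- the simulation: one successful visit of A equals a fixed number of stack steps of B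
theorem pv_sim {pm : List (String × List String)} :
    ∀ (f : Nat) (memo : PySem.Dict String (List String)) (n : String) m' s,
      visitA pm f memo n = some (m', s) →
      ∃ k, k ≤ costF (pvSumLen pm) f ∧
        ∀ (rest : List (String × Bool)) (g : Nat),
          runB pm (k + g) ((n, false) :: rest) memo = runB pm g rest m' := by
  intro f
  induction f with
  | zero => intro memo n m' s h; cases h
  | succ f ih =>
    intro memo n m' s h
    rw [visitA] at h
    cases hg : memo.get? n with
    | some s0 =>
      rw [hg] at h; simp at h
      obtain ⟨h1, h2⟩ := h; subst h1; subst h2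
      refine ⟨1, by simp only [costF]; omega, fun rest g => ?_⟩
      rw [show 1 + g = g + 1 by omega, runB]
      simp [pv_contains_of_get? hg]
    | none =>
      rw [hg] at h
      cases hf : pvOptFold (fun ms p =>
          (visitA pm f ms.1 p).map (fun ms' => (ms'.1, PySem.Set.update (PySem.Set.add ms.2 p) ms'.2)))
          (some (memo, ([] : List String))) ((PySem.Dict.mk pm).getD n []) with
      | none => rw [hf] at h; cases h
      | some ma =>
        rw [hf] at h; simp at h
        obtain ⟨h1, h2⟩ := h
        -- loop simulation
        have hloopsim : ∀ (ps : List String) (m0 : PySem.Dict String (List String)) (a0 : List String)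
            (mL : PySem.Dict String (List String)) (aL : List String),
            pvOptFold (fun ms p =>
                (visitA pm f ms.1 p).map (fun ms' => (ms'.1, PySem.Set.update (PySem.Set.add ms.2 p) ms'.2)))
              (some (m0, a0)) ps = some (mL, aL) →
            ∃ k, k ≤ ps.length * costF (pvSumLen pm) f ∧
              ∀ (rest : List (String × Bool)) (g : Nat),
                runB pm (k + g) (ps.map (fun p => (p, false)) ++ rest) m0 = runB pm g rest mL := by
          intro ps
          induction ps with
          | nil =>
            intro m0 a0 mL aL hl
            cases hl
            exact ⟨0, by simp, fun rest g => by simp⟩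
          | cons p ps ihp =>
            intro m0 a0 mL aL hl
            obtain ⟨b1, hb1, hrest⟩ := pvOptFold_some_cons hl
            cases hv : visitA pm f m0 p with
            | none => rw [hv] at hb1; cases hb1
            | some ms' =>
              rw [hv] at hb1
              cases ms' with
              | mk m1 s1 =>
                simp at hb1; subst hb1
                obtain ⟨kp, hkp, hrunp⟩ := ih m0 p m1 s1 hv
                obtain ⟨kt, hkt, hrunt⟩ := ihp m1 _ mL aL hrest
                refine ⟨kp + kt, ?_, fun rest g => ?_⟩
                · have : (p :: ps).length * costF (pvSumLen pm) f
                      = costF (pvSumLen pm) f + ps.length * costF (pvSumLen pm) f := by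
                    simp [List.length_cons, Nat.succ_mul]; omega
                  omega
                · have heq : kp + kt + g = kp + (kt + g) := by omega
                  rw [heq]
                  simp only [List.map_cons, List.cons_append]
                  rw [hrunp (ps.map (fun q => (q, false)) ++ rest) (kt + g)]
                  exact hrunt rest g
        obtain ⟨kL, hkL, hrunL⟩ := hloopsim ((PySem.Dict.mk pm).getD n []) memo [] ma.1 ma.2 hf
        have hlen : ((PySem.Dict.mk pm).getD n []).length ≤ pvSumLen pm := pv_parents_len_le pm n
        refine ⟨1 + kL + 1, ?_, fun rest g => ?_⟩
        · have : kL ≤ pvSumLen pm * costF (pvSumLen pm) f :=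
            le_trans hkL (Nat.mul_le_mul_right _ hlen)
          simp [costF]; omega
        · -- step 1: expand node
          rw [show 1 + kL + 1 + g = (kL + (1 + g)) + 1 by omega, runB]
          simp only [if_false, Bool.false_eq_true]
          rw [pv_not_contains_of_get? hg]
          simp only [if_false, Bool.false_eq_true]
          rw [pv_revpush]
          -- loop steps
          rw [hrunL ((n, true) :: rest) (1 + g)]
          -- final step: pop (n, true)
          rw [show 1 + g = g + 1 by omega, runB]
          simp only [if_true]
          have hanc : ancB pm ma.1 n = some ma.2 := by
            unfold ancB
            exact pv_loopanc _ memo [] ma.1 ma.2 hf ma.1 (fun x v hv => hv)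
          rw [hanc, ← h1]

-- the outer loops agree
theorem pv_top {pm : List (String × List String)} (hp : Pre_compute_ancestors_py pm) :
    ∀ (l : List (String × List String)) (memo : PySem.Dict String (List String)),
      pvOptFold (fun memo kv => (visitA pm (pm.length + pvSumLen pm + 1) memo kv.1).map Prod.fst)
        (some memo) l
      = pvOptFold (fun res kv =>
          runB pm (costF (pvSumLen pm) (pm.length + pvSumLen pm + 1)) [(kv.1, false)] res)
        (some memo) l := by
  intro l
  induction l with
  | nil => intro memo; rfl
  | cons kv l ih =>
    intro memo
    obtain ⟨⟨m', s⟩, hv⟩ := pv_suf hp (pm.length + pvSumLen pm + 1) kv.1 memo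
      (by have := pv_hgt_le pm (pm.length + pvSumLen pm) kv.1; omega)
    obtain ⟨k, hk, hrun⟩ := pv_sim _ memo kv.1 m' s hv
    have hrun1 : runB pm k [(kv.1, false)] memo = some m' := by
      have := hrun [] 0
      rw [Nat.add_zero] at this
      rw [this, runB_nil]
    have hrunF : runB pm (costF (pvSumLen pm) (pm.length + pvSumLen pm + 1)) [(kv.1, false)] memo = some m' := by
      have := runB_mono pm k [(kv.1, false)] memo m' (costF (pvSumLen pm) (pm.length + pvSumLen pm + 1) - k) hrun1
      rwa [Nat.add_sub_cancel' hk] at this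
    rw [pvOptFold_cons, pvOptFold_cons, hv, hrunF]
    simpa using ih m'

-- ===== VERDICT (by name: the statement is the Claim_ definition above) =====
theorem compute_ancestors_py_spec : Claim_equal_compute_ancestors_py := by
  intro pm _hdom hpre
  unfold Spec_compute_ancestors_py compute_ancestors_py compute_ancestors_py_alt
  rw [pv_top hpre pm PySem.Dict.empty]
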